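-- pv_equiv track=rewrite | github.com/masiarek/starvote | sim_divergence.py | calculate_preference_matrix
-- ===== SOURCE A (Python) =====
-- from collections import defaultdict
--
-- def calculate_preference_matrix(ballot_data_text):
--     """Parses CSV string into a Preference Matrix."""
--     candidates = []
--     ballots = []
--
--     lines = [l.strip() for l in ballot_data_text.strip().split('\n') if l.strip()]
--     if not lines: return None, None
--
--     headers = [h.strip() for h in lines[0].split(',')]
--     candidates = headers
--
--     for line in lines[1:]:
--         parts = line.split(',')
--         try:
--             scores = [int(p.strip()) for p in parts]
--             ballots.append(scores)
--         except: continue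
--
--     num_ballots = len(ballots)
--     matrix = defaultdict(lambda: defaultdict(tuple))
--
--     for i, c_i in enumerate(candidates):
--         for j, c_j in enumerate(candidates):
--             if i == j:
--                 matrix[c_i][c_j] = (0, 0, num_ballots)
--                 continue
--             for_i = 0
--             against_i = 0
--             no_pref = 0
--             for ballot in ballots:
--                 if i < len(ballot) and j < len(ballot):
--                     if ballot[i] > ballot[j]: for_i += 1
--                     elif ballot[j] > ballot[i]: against_i += 1
--                     else: no_pref += 1
--             matrix[c_i][c_j] = (for_i, against_i, no_pref)
--
--     return candidates, matrix
-- ===== SOURCE B (Python) =====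
-- from collections import defaultdict
--
-- def _step(ballot, i, j, t):
--     """Fold one ballot into the (for_i, against_i, no_pref) cell for pair (i, j)."""
--     if i < len(ballot) and j < len(ballot):
--         f, a, n = t
--         if ballot[i] > ballot[j]:
--             return (f + 1, a, n)
--         if ballot[j] > ballot[i]:
--             return (f, a + 1, n)
--         return (f, a, n + 1)
--     return t
--
-- def calculate_preference_matrix(ballot_data_text):
--     """Parses CSV string into a Preference Matrix (single pass over the ballots)."""
--     lines = [l.strip() for l in ballot_data_text.strip().split('\n') if l.strip()]
--     if not lines:
--         return None, None
--     candidates = [h.strip() for h in lines[0].split(',')]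
--     ballots = []
--     for line in lines[1:]:
--         try:
--             ballots.append([int(p.strip()) for p in line.split(',')])
--         except:
--             continue
--     # One pass over the ballots, maintaining a CxC table of cells.
--     table = [[(0, 0, 0) for _ in candidates] for _ in candidates]
--     for ballot in ballots:
--         table = [[_step(ballot, i, j, t) for j, t in enumerate(row)]
--                  for i, row in enumerate(table)]
--     # Emit pass: write the table into the defaultdict matrix in the original order.
--     num_ballots = len(ballots)
--     matrix = defaultdict(lambda: defaultdict(tuple))
--     for i, c_i in enumerate(candidates):
--         for j, c_j in enumerate(candidates):
--             matrix[c_i][c_j] = (0, 0, num_ballots) if i == j else table[i][j]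
--     return candidates, matrix
-- ===== Notes on version B (the rewrite author's own statement) =====
-- stated objective: alternative
-- what changed: Instead of rescanning all ballots for every candidate pair (three nested loops pair-first), B makes one pass over the ballots maintaining a CxC table of (for,against,no_pref) cells, then a separate emit pass writes the table (and the diagonal) into the matrix.
import Mathlib
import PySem

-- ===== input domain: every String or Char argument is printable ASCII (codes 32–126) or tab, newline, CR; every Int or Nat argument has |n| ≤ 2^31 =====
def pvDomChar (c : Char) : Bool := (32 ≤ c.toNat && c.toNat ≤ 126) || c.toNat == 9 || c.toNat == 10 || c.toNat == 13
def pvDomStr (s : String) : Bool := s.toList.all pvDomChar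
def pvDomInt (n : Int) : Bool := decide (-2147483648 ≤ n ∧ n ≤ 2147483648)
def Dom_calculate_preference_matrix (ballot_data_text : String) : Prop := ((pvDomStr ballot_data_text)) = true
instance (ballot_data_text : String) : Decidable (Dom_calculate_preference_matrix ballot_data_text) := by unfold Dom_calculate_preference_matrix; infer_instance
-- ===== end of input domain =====

-- B replaces A's pair-first triple loop (rescanning all ballots for every candidate pair)
-- by a single pass over the ballots maintaining a CxC table of cells, then a separate emit pass;
-- same cost class, alternative decomposition.

-- ===== PORT A =====
-- s.split(sep) for nonempty sep; split? is always some there, the default is never taken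
def pvSplit (s sep : String) : List String := (PySem.Str.split? s sep).getD []

-- shared parse (the parsing lines of A and B are textually identical Python):
-- lines = [l.strip() for l in text.strip().split('\n') if l.strip()]
def pvParseLines (ballot_data_text : String) : List String :=
  ((pvSplit (PySem.Str.strip ballot_data_text) "\n").map PySem.Str.strip).filter
    (fun l => l ≠ "")

-- the ballot loop: a row is kept iff every int(p.strip()) parses (left-to-right, first failure aborts the row)
def pvParseBallots (rest : List String) : List (List Int) :=
  rest.foldl (fun bs line =>
    match (pvSplit line ",").mapM (fun p => PySem.Int.ofStr? (PySem.Str.strip p)) with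
    | some scores => bs ++ [scores]
    | none => bs) []

-- A's matrix building: for each (i, c_i), (j, c_j), scan ALL ballots for that pair
def pvAmatrix (candidates : List String) (ballots : List (List Int)) :
    PySem.Dict String (PySem.Dict String (Int × Int × Int)) :=
  (PySem.List.enumerate candidates 0).foldl (fun m ic =>
    (PySem.List.enumerate candidates 0).foldl (fun m jc =>
      if ic.1 == jc.1 then
        m.insert ic.2 ((m.getD ic.2 PySem.Dict.empty).insert jc.2
          ((0 : Int), (0 : Int), (ballots.length : Int)))
      else
        let t := ballots.foldl (fun (acc : Int × Int × Int) ballot =>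
          if ic.1 < (ballot.length : Int) ∧ jc.1 < (ballot.length : Int) then
            if PySem.List.pyGetD ballot ic.1 0 > PySem.List.pyGetD ballot jc.1 0 then
              (acc.1 + 1, acc.2.1, acc.2.2)
            else if PySem.List.pyGetD ballot jc.1 0 > PySem.List.pyGetD ballot ic.1 0 then
              (acc.1, acc.2.1 + 1, acc.2.2)
            else (acc.1, acc.2.1, acc.2.2 + 1)
          else acc) ((0 : Int), (0 : Int), (0 : Int))
        m.insert ic.2 ((m.getD ic.2 PySem.Dict.empty).insert jc.2 t)) m)
    PySem.Dict.empty

def calculate_preference_matrix (ballot_data_text : String) :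
    Option (List String) × (Option (List (String × List (String × Int × Int × Int)))) :=
  match pvParseLines ballot_data_text with
  | [] => (none, none)
  | l0 :: rest =>
    let candidates := (pvSplit l0 ",").map PySem.Str.strip
    let ballots := pvParseBallots rest
    let matrix := pvAmatrix candidates ballots
    (some candidates, some (matrix.items.map (fun kv => (kv.1, kv.2.items))))

-- ===== PORT B =====
-- Source B's _step: fold one ballot into one (for_i, against_i, no_pref) cell
def pmStep (ballot : List Int) (i j : Int) (t : Int × Int × Int) : Int × Int × Int :=
  if i < (ballot.length : Int) ∧ j < (ballot.length : Int) then
    if PySem.List.pyGetD ballot i 0 > PySem.List.pyGetD ballot j 0 then (t.1 + 1, t.2.1, t.2.2)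
    else if PySem.List.pyGetD ballot j 0 > PySem.List.pyGetD ballot i 0 then (t.1, t.2.1 + 1, t.2.2)
    else (t.1, t.2.1, t.2.2 + 1)
  else t

-- one ballot folded into the whole CxC table (the nested comprehension of Source B)
def pvStepAll (ballot : List Int) (tb : List (List (Int × Int × Int))) :
    List (List (Int × Int × Int)) :=
  (PySem.List.enumerate tb 0).map (fun ir =>
    (PySem.List.enumerate ir.2 0).map (fun jt => pmStep ballot ir.1 jt.1 jt.2))

-- B's matrix: single pass over ballots builds the table, then the emit pass
def pvBmatrix (candidates : List String) (ballots : List (List Int)) :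
    PySem.Dict String (PySem.Dict String (Int × Int × Int)) :=
  let table := ballots.foldl (fun tb ballot => pvStepAll ballot tb)
    (candidates.map (fun _ => candidates.map (fun _ => ((0 : Int), (0 : Int), (0 : Int)))))
  (PySem.List.enumerate candidates 0).foldl (fun m ic =>
    (PySem.List.enumerate candidates 0).foldl (fun m jc =>
      m.insert ic.2 ((m.getD ic.2 PySem.Dict.empty).insert jc.2
        (if ic.1 == jc.1 then ((0 : Int), (0 : Int), (ballots.length : Int))
         else PySem.List.pyGetD (PySem.List.pyGetD table ic.1 []) jc.1 (0, 0, 0)))) m)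
    PySem.Dict.empty

def calculate_preference_matrix_alt (ballot_data_text : String) :
    Option (List String) × (Option (List (String × List (String × Int × Int × Int)))) :=
  match pvParseLines ballot_data_text with
  | [] => (none, none)
  | l0 :: rest =>
    let candidates := (pvSplit l0 ",").map PySem.Str.strip
    let ballots := pvParseBallots rest
    let matrix := pvBmatrix candidates ballots
    (some candidates, some (matrix.items.map (fun kv => (kv.1, kv.2.items))))

-- ===== PRECONDITION & SPEC =====
def Spec_calculate_preference_matrix (ballot_data_text : String) (out : Option (List String) × (Option (List (String × List (String × Int × Int × Int))))) : Prop := out = calculate_preference_matrix_alt ballot_data_text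
instance (ballot_data_text : String) (out : Option (List String) × (Option (List (String × List (String × Int × Int × Int))))) : Decidable (Spec_calculate_preference_matrix ballot_data_text out) := by
  unfold Spec_calculate_preference_matrix
  haveI d1 : DecidableEq (String × Int × Int × Int) := fun a b => instDecidableEqProd a b
  haveI d2 : DecidableEq (List (String × Int × Int × Int)) := fun a b => instDecidableEqList a b
  haveI d3 : DecidableEq (String × List (String × Int × Int × Int)) := fun a b => instDecidableEqProd a b
  haveI d4 : DecidableEq (List (String × List (String × Int × Int × Int))) := fun a b => instDecidableEqList a b
  haveI d5 : DecidableEq (Option (List (String × List (String × Int × Int × Int)))) := fun a b => match a, b with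
    | none, none => isTrue rfl
    | some x, some y => if h : x = y then isTrue (by rw [h]) else isFalse (by simp [h])
    | none, some _ => isFalse (by simp)
    | some _, none => isFalse (by simp)
  infer_instance

-- ===== CLAIM (what is proved, stated in full; the proofs are below) =====
def Claim_equal_calculate_preference_matrix : Prop := ∀ (ballot_data_text : String), Dom_calculate_preference_matrix ballot_data_text → Spec_calculate_preference_matrix ballot_data_text (calculate_preference_matrix ballot_data_text)

-- ===== LEMMAS AND PROOFS =====

-- one pvStepAll application, seen through one cell (ki, kj)
lemma pvStepAll_cell (b : List Int) (tb : List (List (Int × Int × Int))) (ki kj : Nat) :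
    ((pvStepAll b tb)[ki]?.getD [])[kj]? =
      ((tb[ki]?.getD [])[kj]?).map (fun t => pmStep b (ki : Int) (kj : Int) t) := by
  unfold pvStepAll
  rw [List.getElem?_map, PySem.List.getElem?_enumerate]
  cases h : tb[ki]? with
  | none => simp
  | some row =>
    simp only [Option.map_some, Option.getD_some, List.getElem?_map,
      PySem.List.getElem?_enumerate]
    cases hr : row[kj]? <;> simp

-- the whole ballot fold, seen through one cell
lemma pvTable_cell (bs : List (List Int)) (tb : List (List (Int × Int × Int))) (ki kj : Nat) :
    (((bs.foldl (fun tb ballot => pvStepAll ballot tb) tb)[ki]?.getD [])[kj]?) =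
      ((tb[ki]?.getD [])[kj]?).map
        (fun t0 => bs.foldl (fun t b => pmStep b (ki : Int) (kj : Int) t) t0) := by
  induction bs generalizing tb with
  | nil => simp
  | cons b bs ih =>
    simp only [List.foldl_cons]
    rw [ih, pvStepAll_cell]
    cases h : (tb[ki]?.getD [])[kj]? <;> simp

lemma pvMatrix_eq (cs : List String) (bs : List (List Int)) : pvAmatrix cs bs = pvBmatrix cs bs := by
  unfold pvAmatrix pvBmatrix
  apply PySem.List.foldl_congr_mem
  intro m p hp
  apply PySem.List.foldl_congr_mem
  intro m' q hq
  rw [PySem.List.mem_enumerate_iff] at hp hq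
  obtain ⟨ki, hki, rfl⟩ := hp
  obtain ⟨kj, hkj, rfl⟩ := hq
  simp only [zero_add]
  by_cases hij : (ki : Int) == (kj : Int)
  · simp [hij]
  · rw [Bool.eq_false_iff.mpr hij] at *
    simp only [Bool.false_eq_true, if_false]
    congr 2
    rw [PySem.List.pyGetD_natCast, PySem.List.pyGetD_natCast, List.getD_eq_getElem?_getD,
      List.getD_eq_getElem?_getD, pvTable_cell]
    have h0 : ((cs.map (fun _ => cs.map (fun _ =>
        ((0 : Int), (0 : Int), (0 : Int)))))[ki]?.getD [])[kj]? =
        some ((0 : Int), (0 : Int), (0 : Int)) := by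
      rw [List.getElem?_map, List.getElem?_eq_getElem hki]
      simp [hkj]
    rw [h0]
    rfl

-- ===== VERDICT (by name: the statement is the Claim_ definition above) =====
theorem calculate_preference_matrix_spec : Claim_equal_calculate_preference_matrix := by
  intro s _
  unfold Spec_calculate_preference_matrix calculate_preference_matrix calculate_preference_matrix_alt
  cases pvParseLines s with
  | nil => rfl
  | cons l0 rest => simp [pvMatrix_eq]
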